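-- pv_equiv track=rewrite | github.com/Santi759/chepi | parcial_2.py | is_mutant
-- ===== SOURCE A (Python) =====
-- def is_mutant(dna):
--     #Esta lista de tuplas sera las maneras en las que buscaremos las secuencias de ADN (vertical, horizontal o diagonal)
--     #El primer valor representa la fila y el segundo la columna
--     directions= [(1,0),(0,1),(1,1),(-1,1)]
--     #Con este bucle anidado recorreremos la matriz
--     #Con este bucle recorremos las filas
--     for i in range(len(dna)):
--             #Este bucle recorremos las columnas
--             for j in range(len(dna)):
--                 #Con este bucle recorremos las direcciones de los caracteres
--                 for dx, dy in directions:
--                     count=0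
--                     x=i
--                     y=j
--                     #Este bucle while lo usamos para verificar que coordenada x y y se encuentren dentro de los
--                     #limites de la matriz y comparar los valores en las diferentes direcciones y asi poder contar
--                     #si hay concidencias en la secuencia de ADN
--                     while 0 <= x < len(dna) and 0 <= y < len(dna[x]) and dna[x][y] == dna[i][j]:
--                         count += 1
--                         x, y = x + dx, y + dy
--
--                     #Si contador es mayor o igual a 4 (Se encontraron 4 o más caracteres iguales en las diferentes direcciones)
--                     #la función nos retornara True
--                     if count >=4:
--                         return True
--     #En caso de no encontrar coincidencias la función nos retorna un False
--     return False
-- ===== SOURCE B (Python) =====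
-- def is_mutant(dna):
--     # Simpler: check each fixed 4-cell window directly instead of counting
--     # unbounded runs with a while loop.
--     n = len(dna)
--
--     def cell(x, y):
--         if 0 <= x < n and 0 <= y < len(dna[x]):
--             return dna[x][y]
--         return None
--
--     return any(
--         cell(i, j) is not None
--         and all(cell(i + k * dx, j + k * dy) == cell(i, j) for k in range(1, 4))
--         for i in range(n)
--         for j in range(n)
--         for dx, dy in ((1, 0), (0, 1), (1, 1), (-1, 1))
--     )
-- ===== Notes on version B (the rewrite author's own statement) =====
-- stated objective: simpler
-- what changed: Replaced the while-loop that counts an unbounded run in each direction (then tests count>=4) by a direct check of the fixed 4-cell window via a bounds-safe cell() accessor and any()/all() comprehensions.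
import Mathlib
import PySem

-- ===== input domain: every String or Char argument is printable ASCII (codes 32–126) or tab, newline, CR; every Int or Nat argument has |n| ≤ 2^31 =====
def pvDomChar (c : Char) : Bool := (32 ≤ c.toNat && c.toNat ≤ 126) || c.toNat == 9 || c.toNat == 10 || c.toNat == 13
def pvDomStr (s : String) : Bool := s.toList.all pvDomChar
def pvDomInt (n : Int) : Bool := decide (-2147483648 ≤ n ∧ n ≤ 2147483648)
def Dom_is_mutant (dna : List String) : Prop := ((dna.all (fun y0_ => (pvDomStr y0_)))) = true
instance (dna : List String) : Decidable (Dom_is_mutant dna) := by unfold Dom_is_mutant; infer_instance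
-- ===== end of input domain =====

-- B replaces A's unbounded while-loop run counting by a direct check of the fixed
-- 4-cell window through a bounds-safe cell accessor (objective: simpler; same asymptotics in practice).

-- ===== PORT A =====
-- shared low-level accessor: row x of the grid as a character list (junk "" outside; only used under bounds)
def pvRow (dna : List String) (x : Int) : List Char := (dna.getD x.toNat "").toList

-- the while-loop condition of A: (x,y) in bounds and dna[x][y] == dna[i][j]
def pvCondA (dna : List String) (i j x y : Int) : Bool :=
  decide (0 ≤ x ∧ x < (dna.length : Int) ∧ 0 ≤ y ∧ y < ((pvRow dna x).length : Int) ∧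
    (pvRow dna x).getD y.toNat ' ' = (pvRow dna i).getD j.toNat ' ')

-- A's while loop, made total with fuel (the loop moves by (dx,dy) inside the grid,
-- so rows + longest row + 1 steps always suffice; the count is exact)
def pvCount (dna : List String) (i j dx dy : Int) : Nat → Int → Int → Nat
  | 0, _, _ => 0
  | f+1, x, y =>
    if pvCondA dna i j x y then pvCount dna i j dx dy f (x+dx) (y+dy) + 1 else 0

def pvMaxRow (dna : List String) : Nat := dna.foldl (fun m r => max m r.toList.length) 0

def is_mutant (dna : List String) : Bool :=
  let fuel := dna.length + pvMaxRow dna + 1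
  (PySem.List.pyRange 0 (dna.length : Int) 1).any fun i =>
    (PySem.List.pyRange 0 (dna.length : Int) 1).any fun j =>
      ([((1:Int),(0:Int)), (0,1), (1,1), (-1,1)]).any fun d =>
        decide (4 ≤ pvCount dna i j d.1 d.2 fuel i j)

-- ===== PORT B =====
-- B's cell(x, y): the character if in bounds, else none
def pvCell (dna : List String) (x y : Int) : Option Char :=
  if 0 ≤ x ∧ x < (dna.length : Int) then
    if 0 ≤ y ∧ y < ((pvRow dna x).length : Int) then some ((pvRow dna x).getD y.toNat ' ')
    else none
  else none

def is_mutant_alt (dna : List String) : Bool :=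
  (PySem.List.pyRange 0 (dna.length : Int) 1).any fun i =>
    (PySem.List.pyRange 0 (dna.length : Int) 1).any fun j =>
      ([((1:Int),(0:Int)), (0,1), (1,1), (-1,1)]).any fun d =>
        (pvCell dna i j).isSome &&
        ((PySem.List.pyRange 1 4 1).all fun k =>
          pvCell dna (i + k * d.1) (j + k * d.2) == pvCell dna i j)

-- ===== PRECONDITION & SPEC =====
def Spec_is_mutant (dna : List String) (out : Bool) : Prop := out = is_mutant_alt dna
instance (dna : List String) (out : Bool) : Decidable (Spec_is_mutant dna out) := by unfold Spec_is_mutant; infer_instance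

-- ===== CLAIM (what is proved, stated in full; the proofs are below) =====
def Claim_equal_is_mutant : Prop := ∀ (dna : List String), Dom_is_mutant dna → Spec_is_mutant dna (is_mutant dna)

-- ===== LEMMAS AND PROOFS =====

theorem pvCount_le_fuel (dna : List String) (i j dx dy : Int) :
    ∀ (f : Nat) (x y : Int), pvCount dna i j dx dy f x y ≤ f := by
  intro f
  induction f with
  | zero => intro x y; simp [pvCount]
  | succ f ih =>
    intro x y
    simp only [pvCount]
    split
    · exact Nat.succ_le_succ (ih _ _)
    · exact Nat.zero_le _

-- A's count reaches 4 iff the four window cells satisfy the loop condition,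
-- provided the fuel is ≥ 4 whenever the window holds.
theorem pvCount_ge4_iff (dna : List String) (i j dx dy : Int) (F : Nat)
    (hF : (pvCondA dna i j i j = true ∧ pvCondA dna i j (i+dx) (j+dy) = true ∧
           pvCondA dna i j (i+dx+dx) (j+dy+dy) = true ∧
           pvCondA dna i j (i+dx+dx+dx) (j+dy+dy+dy) = true) → 4 ≤ F) :
    (4 ≤ pvCount dna i j dx dy F i j) ↔
      (pvCondA dna i j i j = true ∧ pvCondA dna i j (i+dx) (j+dy) = true ∧
       pvCondA dna i j (i+dx+dx) (j+dy+dy) = true ∧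
       pvCondA dna i j (i+dx+dx+dx) (j+dy+dy+dy) = true) := by
  constructor
  · intro h4
    have hle := pvCount_le_fuel dna i j dx dy F i j
    have h4F : 4 ≤ F := le_trans h4 hle
    obtain ⟨f, rfl⟩ : ∃ f, F = f + 4 := ⟨F - 4, by omega⟩
    simp only [pvCount] at h4
    split at h4
    case isFalse => omega
    case isTrue h0 =>
      split at h4
      case isFalse => omega
      case isTrue h1 =>
        split at h4
        case isFalse => omega
        case isTrue h2 =>
          split at h4
          case isFalse => omega
          case isTrue h3 => exact ⟨h0, h1, h2, h3⟩
  · intro hw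
    have h4F := hF hw
    obtain ⟨h0, h1, h2, h3⟩ := hw
    obtain ⟨f, rfl⟩ : ∃ f, F = f + 4 := ⟨F - 4, by omega⟩
    simp only [pvCount, h0, h1, h2, h3, if_true]
    omega

-- every in-bounds row is at most pvMaxRow long
theorem pvFoldlMax_le_init (l : List String) :
    ∀ m : Nat, m ≤ l.foldl (fun m r => max m r.toList.length) m := by
  induction l with
  | nil => intro m; simp
  | cons b l ihl => intro m; exact le_trans (le_max_left _ _) (ihl _)

theorem pvMaxRow_aux (l : List String) (r : String) :
    ∀ m : Nat, r ∈ l → r.toList.length ≤ l.foldl (fun m r => max m r.toList.length) m := by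
  induction l with
  | nil => intro m h; cases h
  | cons a l ih =>
    intro m h
    rcases List.mem_cons.mp h with rfl | h
    · exact le_trans (le_max_right _ _) (pvFoldlMax_le_init l _)
    · exact ih _ h

theorem pvRow_le_maxRow (dna : List String) (x : Int) (hx0 : 0 ≤ x) (hx : x < (dna.length : Int)) :
    (pvRow dna x).length ≤ pvMaxRow dna := by
  have hxn : x.toNat < dna.length := by omega
  have hget : dna.getD x.toNat "" = dna[x.toNat] := List.getD_eq_getElem dna "" hxn
  have hmem : dna.getD x.toNat "" ∈ dna := by rw [hget]; exact List.getElem_mem hxn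
  exact pvMaxRow_aux dna _ 0 hmem

-- the window condition forces fuel ≥ 4, for each of the four directions
theorem pvFuel_ok (dna : List String) (i j dx dy : Int)
    (hd : (dx = 1 ∧ dy = 0) ∨ (dx = 0 ∧ dy = 1) ∨ (dx = 1 ∧ dy = 1) ∨ (dx = -1 ∧ dy = 1))
    (hw : pvCondA dna i j i j = true ∧ pvCondA dna i j (i+dx) (j+dy) = true ∧
          pvCondA dna i j (i+dx+dx) (j+dy+dy) = true ∧
          pvCondA dna i j (i+dx+dx+dx) (j+dy+dy+dy) = true) :
    4 ≤ dna.length + pvMaxRow dna + 1 := by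
  obtain ⟨h0, -, -, h3⟩ := hw
  simp only [pvCondA, decide_eq_true_eq] at h0 h3
  rcases hd with ⟨rfl, rfl⟩ | ⟨rfl, rfl⟩ | ⟨rfl, rfl⟩ | ⟨rfl, rfl⟩
  · -- (1,0): rows i..i+3 in bounds ⇒ length ≥ 4
    omega
  · -- (0,1): columns j..j+3 of row i ⇒ that row has length ≥ 4 ≤ pvMaxRow
    have := pvRow_le_maxRow dna _ h3.1 h3.2.1
    omega
  · -- (1,1)
    omega
  · -- (-1,1): row i-3 in bounds has length ≥ j+4
    have := pvRow_le_maxRow dna _ h3.1 h3.2.1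
    omega

theorem pvCell_eq_some (dna : List String) (x y : Int) (c : Char) :
    pvCell dna x y = some c ↔
      (0 ≤ x ∧ x < (dna.length : Int) ∧ 0 ≤ y ∧ y < ((pvRow dna x).length : Int) ∧
       (pvRow dna x).getD y.toNat ' ' = c) := by
  by_cases h1 : 0 ≤ x ∧ x < (dna.length : Int)
  · by_cases h2 : 0 ≤ y ∧ y < ((pvRow dna x).length : Int)
    · unfold pvCell
      rw [if_pos h1, if_pos h2]
      simp only [Option.some.injEq]
      constructor
      · intro h; exact ⟨h1.1, h1.2, h2.1, h2.2, h⟩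
      · rintro ⟨-, -, -, -, h⟩; exact h
    · unfold pvCell
      rw [if_pos h1, if_neg h2]
      constructor
      · intro h; cases h
      · rintro ⟨-, -, hy0, hy1, -⟩; exact absurd ⟨hy0, hy1⟩ h2
  · unfold pvCell
    rw [if_neg h1]
    constructor
    · intro h; cases h
    · rintro ⟨hx0, hx1, -⟩; exact absurd ⟨hx0, hx1⟩ h1

-- the B window test equals the conjunction of A's loop conditions at the 4 cells
theorem pvWindow_eq (dna : List String) (i j dx dy : Int) :
    ((pvCell dna i j).isSome &&
      ((PySem.List.pyRange 1 4 1).all fun k =>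
        pvCell dna (i + k * dx) (j + k * dy) == pvCell dna i j)) = true ↔
      (pvCondA dna i j i j = true ∧ pvCondA dna i j (i+dx) (j+dy) = true ∧
       pvCondA dna i j (i+dx+dx) (j+dy+dy) = true ∧
       pvCondA dna i j (i+dx+dx+dx) (j+dy+dy+dy) = true) := by
  have hrange : PySem.List.pyRange 1 4 1 = [1, 2, 3] := by decide
  rw [hrange]
  simp only [List.all_cons, List.all_nil, Bool.and_true, Bool.and_eq_true, beq_iff_eq,
    Option.isSome_iff_exists]
  constructor
  · rintro ⟨⟨c0, hc0⟩, h1, h2, h3⟩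
    rw [pvCell_eq_some] at hc0
    obtain ⟨hi0, hi1, hj0, hj1, hchar⟩ := hc0
    have hcell0 : pvCell dna i j = some c0 := by
      rw [pvCell_eq_some]; exact ⟨hi0, hi1, hj0, hj1, hchar⟩
    rw [hcell0] at h1 h2 h3
    rw [pvCell_eq_some] at h1 h2 h3
    have e1x : i + 1 * dx = i + dx := by ring
    have e1y : j + 1 * dy = j + dy := by ring
    have e2x : i + 2 * dx = i + dx + dx := by ring
    have e2y : j + 2 * dy = j + dy + dy := by ring
    have e3x : i + 3 * dx = i + dx + dx + dx := by ring
    have e3y : j + 3 * dy = j + dy + dy + dy := by ring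
    rw [e1x, e1y] at h1; rw [e2x, e2y] at h2; rw [e3x, e3y] at h3
    refine ⟨?_, ?_, ?_, ?_⟩ <;> simp only [pvCondA, decide_eq_true_eq]
    · exact ⟨hi0, hi1, hj0, hj1, by simp⟩
    · exact ⟨h1.1, h1.2.1, h1.2.2.1, h1.2.2.2.1, by rw [h1.2.2.2.2, hchar]⟩
    · exact ⟨h2.1, h2.2.1, h2.2.2.1, h2.2.2.2.1, by rw [h2.2.2.2.2, hchar]⟩
    · exact ⟨h3.1, h3.2.1, h3.2.2.1, h3.2.2.2.1, by rw [h3.2.2.2.2, hchar]⟩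
  · rintro ⟨h0, h1, h2, h3⟩
    simp only [pvCondA, decide_eq_true_eq] at h0 h1 h2 h3
    set c0 := (pvRow dna i).getD j.toNat ' ' with hc0def
    have hcell0 : pvCell dna i j = some c0 := by
      rw [pvCell_eq_some]
      exact ⟨h0.1, h0.2.1, h0.2.2.1, h0.2.2.2.1, rfl⟩
    refine ⟨⟨c0, hcell0⟩, ?_, ?_, ?_⟩ <;> rw [hcell0, pvCell_eq_some]
    · have ex : i + 1 * dx = i + dx := by ring
      have ey : j + 1 * dy = j + dy := by ring
      rw [ex, ey]
      exact ⟨h1.1, h1.2.1, h1.2.2.1, h1.2.2.2.1, h1.2.2.2.2⟩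
    · have ex : i + 2 * dx = i + dx + dx := by ring
      have ey : j + 2 * dy = j + dy + dy := by ring
      rw [ex, ey]
      exact ⟨h2.1, h2.2.1, h2.2.2.1, h2.2.2.2.1, h2.2.2.2.2⟩
    · have ex : i + 3 * dx = i + dx + dx + dx := by ring
      have ey : j + 3 * dy = j + dy + dy + dy := by ring
      rw [ex, ey]
      exact ⟨h3.1, h3.2.1, h3.2.2.1, h3.2.2.2.1, h3.2.2.2.2⟩

-- per-cell, per-direction agreement of the two inner tests
theorem pvInner_eq (dna : List String) (i j dx dy : Int)
    (hd : (dx = 1 ∧ dy = 0) ∨ (dx = 0 ∧ dy = 1) ∨ (dx = 1 ∧ dy = 1) ∨ (dx = -1 ∧ dy = 1)) :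
    decide (4 ≤ pvCount dna i j dx dy (dna.length + pvMaxRow dna + 1) i j) =
      ((pvCell dna i j).isSome &&
        ((PySem.List.pyRange 1 4 1).all fun k =>
          pvCell dna (i + k * dx) (j + k * dy) == pvCell dna i j)) := by
  have hiff := pvCount_ge4_iff dna i j dx dy (dna.length + pvMaxRow dna + 1)
    (pvFuel_ok dna i j dx dy hd)
  have hwin := pvWindow_eq dna i j dx dy
  by_cases h : 4 ≤ pvCount dna i j dx dy (dna.length + pvMaxRow dna + 1) i j
  · simp [h, hwin.mpr (hiff.mp h)]
  · simp only [h, decide_false]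
    by_contra hb
    exact h (hiff.mpr (hwin.mp (by
      cases hx : ((pvCell dna i j).isSome &&
        ((PySem.List.pyRange 1 4 1).all fun k =>
          pvCell dna (i + k * dx) (j + k * dy) == pvCell dna i j)) with
      | true => rfl
      | false => exact absurd hx.symm hb)))

-- ===== VERDICT (by name: the statement is the Claim_ definition above) =====
theorem is_mutant_spec : Claim_equal_is_mutant := by
  intro dna _
  unfold Spec_is_mutant is_mutant is_mutant_alt
  have hfun :
      (fun i => (PySem.List.pyRange 0 (dna.length : Int) 1).any fun j =>
        ([((1:Int),(0:Int)), (0,1), (1,1), (-1,1)]).any fun d =>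
          decide (4 ≤ pvCount dna i j d.1 d.2 (dna.length + pvMaxRow dna + 1) i j)) =
      (fun i => (PySem.List.pyRange 0 (dna.length : Int) 1).any fun j =>
        ([((1:Int),(0:Int)), (0,1), (1,1), (-1,1)]).any fun d =>
          (pvCell dna i j).isSome &&
          ((PySem.List.pyRange 1 4 1).all fun k =>
            pvCell dna (i + k * d.1) (j + k * d.2) == pvCell dna i j)) := by
    funext i
    congr 1
    funext j
    simp only [List.any_cons, List.any_nil]
    rw [pvInner_eq dna i j 1 0 (Or.inl ⟨rfl, rfl⟩),
        pvInner_eq dna i j 0 1 (Or.inr (Or.inl ⟨rfl, rfl⟩)),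
        pvInner_eq dna i j 1 1 (Or.inr (Or.inr (Or.inl ⟨rfl, rfl⟩))),
        pvInner_eq dna i j (-1) 1 (Or.inr (Or.inr (Or.inr ⟨rfl, rfl⟩)))]
  show ((PySem.List.pyRange 0 (dna.length : Int) 1).any fun i =>
      (PySem.List.pyRange 0 (dna.length : Int) 1).any fun j =>
        ([((1:Int),(0:Int)), (0,1), (1,1), (-1,1)]).any fun d =>
          decide (4 ≤ pvCount dna i j d.1 d.2 (dna.length + pvMaxRow dna + 1) i j)) = _
  rw [hfun]
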